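-- pv_equiv track=rewrite | github.com/shasyas/ege | 17012025/file170105.py | fye
-- ===== SOURCE A (Python) =====
-- def zxc(x):
--     y = x
--     z = ''
--     if x == 0:
--         z = '0'
--     while y > 0:
--         z = str(y%3) + z
--         y = y // 3
--     return z
--
-- def fye(n):
--     x = zxc(n)
--     c = 0
--     if n%3 == 0:
--         x = x + x[-2::]
--     else:
--         for i in x:
--             c = c + int(i)
--
--         x = x + zxc(c)
--
--     return int(x)
-- ===== SOURCE B (Python) =====
-- def _rec3(y):
--     # base-3 digits of y built by divide-by-3 recursion; '' when y <= 0
--     if y <= 0: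
--         return ''
--     return _rec3(y // 3) + str(y % 3)
--
-- def _conv(x):
--     return '0' if x == 0 else _rec3(x)
--
-- def fye(n):
--     if n % 3 == 0:
--         s = _conv(n)
--         return int(s + s[-2:])
--     c, y = 0, n
--     while y > 0:
--         c += y % 3
--         y //= 3
--     return int(_conv(n) + _conv(c))
-- ===== Notes on version B (the rewrite author's own statement) =====
-- stated objective: alternative
-- what changed: Base-3 conversion is a divide-by-3 recursion appending digits instead of a while-loop prepending into an accumulator, and the digit sum is computed arithmetically by repeated n%3/n//3 instead of iterating over the string's characters.
import Mathlib
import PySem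

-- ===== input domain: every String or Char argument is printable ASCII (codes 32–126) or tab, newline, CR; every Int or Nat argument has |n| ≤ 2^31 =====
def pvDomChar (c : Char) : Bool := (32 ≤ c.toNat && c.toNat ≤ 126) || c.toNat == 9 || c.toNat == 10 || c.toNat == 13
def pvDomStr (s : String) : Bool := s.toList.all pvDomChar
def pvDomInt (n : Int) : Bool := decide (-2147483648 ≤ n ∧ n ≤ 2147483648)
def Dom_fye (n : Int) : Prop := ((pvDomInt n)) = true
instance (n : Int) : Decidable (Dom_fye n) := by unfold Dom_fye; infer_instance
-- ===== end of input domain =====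

-- B replaces A's accumulating while-loop base-3 conversion by a divide-by-3 recursion and
-- computes the digit sum arithmetically from n instead of iterating over the string (objective: alternative).


-- termination helper for both ports' divide-by-3 loops
theorem pv_div3_lt (y : Int) (h : 0 < y) : (PySem.Int.floordiv y 3).toNat < y.toNat := by
  rw [PySem.Int.floordiv_eq_ediv_of_pos (by norm_num)]
  omega

-- ===== PORT A =====
-- strings are carried as List Char (PySem.Chars representation); int()/str() are PySem.Int.ofChars?/toChars
-- the while-loop of zxc: z accumulates str(y%3) on the LEFT, y = y // 3
def zxcLoop (y : Int) (z : List Char) : List Char :=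
  if h : 0 < y then
    zxcLoop (PySem.Int.floordiv y 3) (PySem.Int.toChars (PySem.Int.mod y 3) ++ z)
  else z
termination_by y.toNat
decreasing_by exact pv_div3_lt y h

def zxc (x : Int) : List Char :=
  zxcLoop x (if x = 0 then ['0'] else [])

def fye (n : Int) : Int :=
  let x := zxc n
  if PySem.Int.mod n 3 = 0 then
    -- x = x + x[-2::]; return int(x)   (int('') raises: excluded by Pre_, port returns the getD default there)
    (PySem.Int.ofChars? (x ++ PySem.List.slice x (some (-2)) none)).getD 0
  else
    -- for i in x: c = c + int(i);  x = x + zxc(c); return int(x)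
    let c := x.foldl (fun c i => c + (PySem.Int.ofChars? [i]).getD 0) 0
    (PySem.Int.ofChars? (x ++ zxc c)).getD 0

-- ===== PORT B =====
-- recursive base-3 conversion: '' when y <= 0 else rec3(y//3) + str(y%3)
def rec3 (y : Int) : List Char :=
  if h : y ≤ 0 then []
  else rec3 (PySem.Int.floordiv y 3) ++ PySem.Int.toChars (PySem.Int.mod y 3)
termination_by y.toNat
decreasing_by exact pv_div3_lt y (by omega)

def conv (x : Int) : List Char := if x = 0 then ['0'] else rec3 x

-- arithmetic digit sum: while y > 0: c += y % 3; y //= 3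
def digitSum (y c : Int) : Int :=
  if h : 0 < y then digitSum (PySem.Int.floordiv y 3) (c + PySem.Int.mod y 3) else c
termination_by y.toNat
decreasing_by exact pv_div3_lt y h

def fye_alt (n : Int) : Int :=
  if PySem.Int.mod n 3 = 0 then
    let s := conv n
    (PySem.Int.ofChars? (s ++ PySem.List.slice s (some (-2)) none)).getD 0
  else
    (PySem.Int.ofChars? (conv n ++ conv (digitSum n 0))).getD 0

-- ===== PRECONDITION & SPEC =====
-- Pre_ excludes n < 0 with n % 3 == 0: there zxc(n) = '' and Python's int('') raises ValueError.
def Pre_fye (n : Int) : Prop := 0 ≤ n ∨ PySem.Int.mod n 3 ≠ 0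
instance (n : Int) : Decidable (Pre_fye n) := by unfold Pre_fye; infer_instance
def pvWitness_fye : Int := 5
def Spec_fye (n : Int) (out : Int) : Prop := out = fye_alt n
instance (n : Int) (out : Int) : Decidable (Spec_fye n out) := by unfold Spec_fye; infer_instance

-- ===== CLAIM (what is proved, stated in full; the proofs are below) =====
def Claim_equal_fye : Prop := ∀ (n : Int), Dom_fye n → Pre_fye n → Spec_fye n (fye n)

-- ===== LEMMAS AND PROOFS =====

-- A's accumulating loop equals B's recursion followed by the accumulator
theorem zxcLoop_eq_rec3 (k : Nat) : ∀ (y : Int), y.toNat ≤ k → ∀ z, zxcLoop y z = rec3 y ++ z := by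
  induction k with
  | zero =>
    intro y hy z
    have hy0 : ¬ 0 < y := by omega
    rw [zxcLoop, rec3, dif_neg hy0, dif_pos (by omega)]
    simp
  | succ k ih =>
    intro y hy z
    by_cases h : 0 < y
    · rw [zxcLoop, rec3, dif_pos h, dif_neg (by omega)]
      rw [ih _ (by have := pv_div3_lt y h; omega)]
      simp
    · rw [zxcLoop, rec3, dif_neg h, dif_pos (by omega)]
      simp

theorem zxc_eq_conv (x : Int) : zxc x = conv x := by
  unfold zxc conv
  by_cases hx : x = 0
  · subst hx
    rw [if_pos rfl, if_pos rfl, zxcLoop_eq_rec3 0 0 (by omega)]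
    rw [rec3, dif_pos (by omega)]
    simp
  · rw [if_neg hx, if_neg hx, zxcLoop_eq_rec3 x.toNat x (le_refl _)]
    simp

-- digitSum shifts its accumulator additively
theorem digitSum_shift (k : Nat) : ∀ (y : Int), y.toNat ≤ k → ∀ c m : Int,
    digitSum y (c + m) = digitSum y c + m := by
  induction k with
  | zero =>
    intro y hy c m
    have hy0 : ¬ 0 < y := by omega
    conv_lhs => rw [digitSum]
    conv_rhs => rw [digitSum]
    simp only [dif_neg hy0]
  | succ k ih =>
    intro y hy c m
    by_cases h : 0 < y
    · conv_lhs => rw [digitSum]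
      conv_rhs => rw [digitSum]
      rw [dif_pos h]
      rw [show c + m + PySem.Int.mod y 3 = c + PySem.Int.mod y 3 + m from by ring]
      rw [dif_pos h]
      have hk : (PySem.Int.floordiv y 3).toNat ≤ k := by have := pv_div3_lt y h; omega
      exact ih _ hk _ _
    · conv_lhs => rw [digitSum]
      conv_rhs => rw [digitSum]
      simp only [dif_neg h]

-- A's char-by-char digit sum over B's base-3 string equals B's arithmetic digit sum
theorem fold_rec3 (k : Nat) : ∀ (y : Int), y.toNat ≤ k → ∀ c0 : Int,
    (rec3 y).foldl (fun c i => c + (PySem.Int.ofChars? [i]).getD 0) c0 = digitSum y c0 := by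
  induction k with
  | zero =>
    intro y hy c0
    have hy0 : ¬ 0 < y := by omega
    rw [rec3, digitSum, dif_pos (by omega), dif_neg hy0]
    simp
  | succ k ih =>
    intro y hy c0
    by_cases h : 0 < y
    · rw [rec3, digitSum, dif_neg (by omega), dif_pos h]
      have hk : (PySem.Int.floordiv y 3).toNat ≤ k := by have := pv_div3_lt y h; omega
      rw [List.foldl_append, ih _ hk]
      have hm0 : 0 ≤ PySem.Int.mod y 3 := PySem.Int.mod_nonneg (a := y) (by norm_num)
      have hm3 : PySem.Int.mod y 3 < 3 := PySem.Int.mod_lt (a := y) (by norm_num)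
      have hshift := digitSum_shift (PySem.Int.floordiv y 3).toNat (PySem.Int.floordiv y 3)
        (le_refl _) c0 (PySem.Int.mod y 3)
      have hm : PySem.Int.mod y 3 = 0 ∨ PySem.Int.mod y 3 = 1 ∨ PySem.Int.mod y 3 = 2 := by omega
      rcases hm with hm | hm | hm <;> rw [hm] at hshift ⊢ <;>
        simp only [show PySem.Int.toChars 0 = ['0'] from by decide,
          show PySem.Int.toChars 1 = ['1'] from by decide,
          show PySem.Int.toChars 2 = ['2'] from by decide,
          List.foldl_cons, List.foldl_nil,
          show (PySem.Int.ofChars? ['0']).getD 0 = 0 from by decide,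
          show (PySem.Int.ofChars? ['1']).getD 0 = 1 from by decide,
          show (PySem.Int.ofChars? ['2']).getD 0 = 2 from by decide] <;>
        omega
    · rw [rec3, digitSum, dif_pos (by omega), dif_neg h]
      simp

theorem fold_conv (y : Int) (hy : y ≠ 0) :
    (conv y).foldl (fun c i => c + (PySem.Int.ofChars? [i]).getD 0) 0 = digitSum y 0 := by
  rw [conv, if_neg hy]
  exact fold_rec3 y.toNat y (le_refl _) 0

-- ===== VERDICT (by name: the statement is the Claim_ definition above) =====
theorem fye_spec : Claim_equal_fye := by
  unfold Claim_equal_fye Spec_fye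
  intro n _ _
  unfold fye fye_alt
  by_cases h : PySem.Int.mod n 3 = 0
  · rw [if_pos h, if_pos h, zxc_eq_conv]
  · have hn : n ≠ 0 := by
      intro h0; subst h0; exact h (by decide)
    rw [if_neg h, if_neg h]
    simp only [zxc_eq_conv, fold_conv n hn]
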